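-- pv_equiv track=rewrite | github.com/baeksangha/python_sw | 1494_사랑의카운슬러/source.py | solution
-- ===== SOURCE A (Python) =====
-- from itertools import combinations
-- import math
--
-- def solution(n, points):
--
--     xs = [x[0] for x in points]
--     ys = [x[1] for x in points]
--     combs = list(map(list, combinations([x for x in range(n)], n//2)))
--
--     answer = math.inf
--     for comb in combs:
--         x_sum = sum([xs[x] if x in comb else -xs[x] for x in range(n)])
--         y_sum = sum([ys[x] if x in comb else -ys[x] for x in range(n)])
--         answer = min(answer, x_sum**2+y_sum**2)
--     return answer
-- ===== SOURCE B (Python) =====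
-- def solution(n, points):
--     # Subset-sum dynamic programming over reachable (count, sx, sy) states
--     # (deduplicated in a set), instead of enumerating all C(n, n//2)
--     # index combinations: process each point once, extending every state
--     # with count < n//2, then minimize over the states of count n//2.
--     half = n // 2
--     tx = ty = 0
--     reach = {(0, 0, 0)}
--     for i in range(n):
--         x, y = points[i]
--         tx += x
--         ty += y
--         reach |= {(c + 1, sx + x, sy + y) for (c, sx, sy) in reach if c < half}
--     return min((2 * sx - tx) ** 2 + (2 * sy - ty) ** 2
--                for (c, sx, sy) in reach if c == half)
-- ===== Notes on version B (the rewrite author's own statement) =====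
-- stated objective: alternative
-- what changed: Replaces A's enumeration of all C(n,n/2) index combinations (each scanned against all n indices by membership test) with a subset-sum dynamic programming pass: one traversal of the points maintaining the deduplicated set of reachable (count, x-sum, y-sum) states capped at count n//2, then minimizing (2*sx-tx)^2+(2*sy-ty)^2 over the states of count n//2; correct because the reachable states of count n//2 are exactly the coordinate sums of the size-n//2 subsets, and the minimum depends only on that set of values (dedup can shrink the state space far below C(n,n/2) on duplicate-heavy inputs).
import Mathlib
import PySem

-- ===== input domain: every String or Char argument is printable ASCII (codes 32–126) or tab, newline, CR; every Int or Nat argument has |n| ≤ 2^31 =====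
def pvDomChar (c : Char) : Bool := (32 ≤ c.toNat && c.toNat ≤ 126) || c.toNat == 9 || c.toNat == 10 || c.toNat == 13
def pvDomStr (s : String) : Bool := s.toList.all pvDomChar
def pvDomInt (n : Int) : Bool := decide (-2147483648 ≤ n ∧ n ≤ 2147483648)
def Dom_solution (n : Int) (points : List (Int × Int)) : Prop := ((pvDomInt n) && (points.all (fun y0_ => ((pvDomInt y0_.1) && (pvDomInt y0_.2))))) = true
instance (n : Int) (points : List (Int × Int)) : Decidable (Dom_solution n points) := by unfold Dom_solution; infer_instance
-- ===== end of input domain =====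

-- B replaces A's enumeration of all n//2-index combinations by a subset-sum DP over the
-- deduplicated set of reachable (count, x-sum, y-sum) states (alternative algorithm, same result).


-- ===== PORT A =====
-- itertools.combinations(l, r) over a list of indices, in itertools order
def pvCombos (l : List Int) (r : Nat) : List (List Int) :=
  match r, l with
  | 0, _ => [[]]
  | _ + 1, [] => []
  | r + 1, a :: t => (pvCombos t r).map (fun c => a :: c) ++ pvCombos t (r + 1)

-- literal port of A; `answer = math.inf` is `none`, never returned since combs ≠ []
def solution (n : Int) (points : List (Int × Int)) : Int :=
  let xs := points.map (·.1)
  let ys := points.map (·.2)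
  let combs := pvCombos (PySem.List.pyRange 0 n 1) ((PySem.Int.floordiv n 2).toNat)
  let answer : Option Int := combs.foldl (fun acc comb =>
    let x_sum := ((PySem.List.pyRange 0 n 1).map
      (fun x => if x ∈ comb then PySem.List.pyGetD xs x 0 else -(PySem.List.pyGetD xs x 0))).sum
    let y_sum := ((PySem.List.pyRange 0 n 1).map
      (fun x => if x ∈ comb then PySem.List.pyGetD ys x 0 else -(PySem.List.pyGetD ys x 0))).sum
    some (match acc with
          | none => x_sum ^ 2 + y_sum ^ 2
          | some a => min a (x_sum ^ 2 + y_sum ^ 2))) none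
  answer.getD 0

-- ===== PORT B =====
-- subset-sum DP: the state is (tx, ty, set of reachable (count, sx, sy) triples);
-- `reach |= {comprehension}` is Set.update with the mapped extensions; min() over the
-- resulting values is PySem.List.min? (order-independent: plain min of Ints, no key),
-- with getD 0 for the never-reached empty case (0 ≤ n//2 ≤ n gives a count-n//2 state)
def solution_alt (n : Int) (points : List (Int × Int)) : Int :=
  let half := PySem.Int.floordiv n 2
  let st := (PySem.List.pyRange 0 n 1).foldl
    (fun (st : Int × Int × PySem.Set (Int × Int × Int)) i =>
      let p := PySem.List.pyGetD points i (0, 0)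
      let new := st.2.2.filterMap (fun u =>
        if u.1 < half then some (u.1 + 1, u.2.1 + p.1, u.2.2 + p.2) else none)
      (st.1 + p.1, st.2.1 + p.2, PySem.Set.update st.2.2 new))
    (0, 0, PySem.Set.ofList [(0, 0, 0)])
  (PySem.List.min? (st.2.2.filterMap (fun (u : Int × Int × Int) =>
      if u.1 == half then some ((2 * u.2.1 - st.1) ^ 2 + (2 * u.2.2 - st.2.1) ^ 2) else none))
    (fun v => v)).getD 0

-- ===== PRECONDITION & SPEC =====
-- Pre_: A raises ValueError for n < 0 (negative combinations size) and IndexError for n > len(points)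
def Pre_solution (n : Int) (points : List (Int × Int)) : Prop :=
  0 ≤ n ∧ n ≤ points.length
instance (n : Int) (points : List (Int × Int)) : Decidable (Pre_solution n points) := by
  unfold Pre_solution; infer_instance

def pvWitness_solution : Int × (List (Int × Int)) := (4, [(1, 2), (-3, 4), (5, -6), (0, 7)])

def Spec_solution (n : Int) (points : List (Int × Int)) (out : Int) : Prop := out = solution_alt n points
instance (n : Int) (points : List (Int × Int)) (out : Int) : Decidable (Spec_solution n points out) := by unfold Spec_solution; infer_instance

-- ===== CLAIM (what is proved, stated in full; the proofs are below) =====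
def Claim_equal_solution : Prop := ∀ (n : Int) (points : List (Int × Int)), Dom_solution n points → Pre_solution n points → Spec_solution n points (solution n points)

-- ===== LEMMAS AND PROOFS =====

-- pvCombos generates exactly the sublists of the given length
theorem pvCombos_mem_iff (l : List Int) (r : Nat) (c : List Int) :
    c ∈ pvCombos l r ↔ c.Sublist l ∧ c.length = r := by
  induction l generalizing r c with
  | nil =>
    cases r with
    | zero => simp [pvCombos, List.length_eq_zero_iff]
    | succ r =>
      simp only [pvCombos, List.not_mem_nil, false_iff, not_and]
      intro h
      have := List.sublist_nil.mp h
      subst this; simp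
  | cons a t ih =>
    cases r with
    | zero =>
      simp [pvCombos, List.length_eq_zero_iff]
      rintro rfl; simp
    | succ r =>
      simp only [pvCombos, List.mem_append, List.mem_map, ih]
      constructor
      · rintro (⟨c', ⟨hs, hl⟩, rfl⟩ | ⟨hs, hl⟩)
        · exact ⟨hs.cons₂ a, by simp [hl]⟩
        · exact ⟨hs.cons a, hl⟩
      · rintro ⟨hs, hl⟩
        rcases List.sublist_cons_iff.mp hs with h | ⟨c', rfl, hc'⟩
        · exact Or.inr ⟨h, hl⟩
        · exact Or.inl ⟨c', ⟨hc', by simpa using hl⟩, rfl⟩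

-- A's running-min fold over an option accumulator is List.min? of the mapped values
theorem pvfold_min_aux {β : Type} (f : β → Int) (L : List β) : ∀ (a : Int),
    L.foldl (fun acc c => some (match acc with | none => f c | some a => min a (f c))) (some a)
      = some ((L.map f).foldl min a) := by
  induction L with
  | nil => intro a; rfl
  | cons x t ih => intro a; simp only [List.foldl_cons, List.map_cons]; exact ih (min a (f x))

theorem pvfold_min {β : Type} (f : β → Int) (L : List β) :
    L.foldl (fun acc c => some (match acc with | none => f c | some a => min a (f c))) none
      = (L.map f).min? := by
  cases L with
  | nil => rfl
  | cons x t =>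
    simp only [List.foldl_cons, List.map_cons, List.min?_cons']
    exact pvfold_min_aux f t (f x)

-- min? of an Int list depends only on its members
theorem pvmin_some_iff (l : List Int) (m : Int) : l.min? = some m ↔ m ∈ l ∧ ∀ b ∈ l, m ≤ b :=
  List.min?_eq_some_iff

theorem pvmin_congr (l l' : List Int) (h : ∀ x, x ∈ l ↔ x ∈ l') : l.min? = l'.min? := by
  cases hl : l.min? with
  | none =>
    rw [List.min?_eq_none_iff] at hl
    subst hl
    cases hl' : l'.min? with
    | none => rfl
    | some m =>
      have := (pvmin_some_iff l' m).mp hl'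
      exact absurd ((h m).mpr this.1) (List.not_mem_nil)
  | some m =>
    have hm := (pvmin_some_iff l m).mp hl
    exact ((pvmin_some_iff l' m).mpr ⟨(h m).mp hm.1, fun b hb => hm.2 b ((h b).mpr hb)⟩).symm

-- PySem's keyless min is List.min?
theorem pvpymin_id (xs : List Int) : PySem.List.min? xs (fun v => v) = xs.min? := by
  cases xs with
  | nil => rfl
  | cons x t => rw [PySem.List.min?_id_cons, List.min?_cons']

-- one DP step of B's reach set, factored out of the port's fold
def pvStep (half : Int) (g : Int → Int × Int) (s : PySem.Set (Int × Int × Int)) (i : Int) :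
    PySem.Set (Int × Int × Int) :=
  PySem.Set.update s (s.filterMap (fun u =>
    if u.1 < half then some (u.1 + 1, u.2.1 + (g i).1, u.2.2 + (g i).2) else none))

-- B's combined fold splits into the two running sums and the pure reach fold
theorem pvFold_split (half : Int) (points : List (Int × Int)) (l : List Int) :
    ∀ (tx ty : Int) (s : PySem.Set (Int × Int × Int)),
    l.foldl (fun (st : Int × Int × PySem.Set (Int × Int × Int)) i =>
      (st.1 + (PySem.List.pyGetD points i (0, 0)).1,
       st.2.1 + (PySem.List.pyGetD points i (0, 0)).2,
       PySem.Set.update st.2.2 (st.2.2.filterMap (fun u =>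
         if u.1 < half then
           some (u.1 + 1, u.2.1 + (PySem.List.pyGetD points i (0, 0)).1,
                 u.2.2 + (PySem.List.pyGetD points i (0, 0)).2)
         else none)))) (tx, ty, s)
    = (tx + (l.map (fun i => (PySem.List.pyGetD points i (0, 0)).1)).sum,
       ty + (l.map (fun i => (PySem.List.pyGetD points i (0, 0)).2)).sum,
       l.foldl (pvStep half (fun i => PySem.List.pyGetD points i (0, 0))) s) := by
  induction l with
  | nil => intro tx ty s; simp
  | cons i t ih =>
    intro tx ty s
    simp only [List.foldl_cons, List.map_cons, List.sum_cons]
    rw [ih]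
    refine Prod.ext (by ring) (Prod.ext (by ring) ?_)
    rfl

theorem pvMem_step (half : Int) (g : Int → Int × Int) (s : PySem.Set (Int × Int × Int)) (i : Int)
    (t : Int × Int × Int) :
    t ∈ pvStep half g s i ↔ t ∈ s ∨ ∃ u ∈ s, u.1 < half ∧
      t = (u.1 + 1, u.2.1 + (g i).1, u.2.2 + (g i).2) := by
  unfold pvStep
  rw [PySem.Set.mem_update]
  simp only [List.mem_filterMap]
  constructor
  · rintro (h | ⟨u, hu, he⟩)
    · exact Or.inl h
    · split_ifs at he with hc
      exact Or.inr ⟨u, hu, hc, (Option.some_inj.mp he).symm⟩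
  · rintro (h | ⟨u, hu, hc, rfl⟩)
    · exact Or.inl h
    · exact Or.inr ⟨u, hu, by simp [hc]⟩

-- the states reachable by B's DP from s: extend any u ∈ s by any sublist c of the
-- remaining indices, capped at count `half`
theorem pvMem_reach (half : Int) (g : Int → Int × Int) (l : List Int) :
    ∀ (s : PySem.Set (Int × Int × Int)) (t : Int × Int × Int),
    t ∈ l.foldl (pvStep half g) s ↔
      ∃ u ∈ s, ∃ c : List Int, c.Sublist l ∧ (c = [] ∨ u.1 + c.length ≤ half) ∧
        t = (u.1 + c.length, u.2.1 + (c.map (fun i => (g i).1)).sum,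
             u.2.2 + (c.map (fun i => (g i).2)).sum) := by
  induction l with
  | nil =>
    intro s t
    simp only [List.foldl_nil]
    constructor
    · intro h
      exact ⟨t, h, [], by simp⟩
    · rintro ⟨u, hu, c, hc, _, rfl⟩
      have : c = [] := List.sublist_nil.mp hc
      subst this; simpa using hu
  | cons i l ih =>
    intro s t
    rw [List.foldl_cons, ih]
    constructor
    · rintro ⟨u', hu', c, hc, hcond, rfl⟩
      rcases (pvMem_step half g s i u').mp hu' with h | ⟨u, hu, hlt, rfl⟩
      · exact ⟨u', h, c, hc.cons i, hcond, rfl⟩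
      · refine ⟨u, hu, i :: c, hc.cons₂ i, ?_, ?_⟩
        · right
          rcases hcond with rfl | hle
          · simpa using hlt
          · simp only [List.length_cons] at hle ⊢; push_cast at hle ⊢; omega
        · simp only [List.map_cons, List.sum_cons, List.length_cons]
          push_cast
          refine Prod.ext (by ring) (Prod.ext (by ring) (by ring))
    · rintro ⟨u, hu, c, hc, hcond, rfl⟩
      rcases List.sublist_cons_iff.mp hc with h | ⟨c', rfl, hc'⟩
      · refine ⟨u, (pvMem_step half g s i u).mpr (Or.inl hu), c, h, hcond, rfl⟩
      · have hlt : u.1 < half := by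
          rcases hcond with h' | hle
          · simp at h'
          · simp only [List.length_cons] at hle; push_cast at hle; omega
        refine ⟨(u.1 + 1, u.2.1 + (g i).1, u.2.2 + (g i).2),
          (pvMem_step half g s i (u.1 + 1, u.2.1 + (g i).1, u.2.2 + (g i).2)).mpr
            (Or.inr ⟨u, hu, hlt, rfl⟩), c', hc', ?_, ?_⟩
        · rcases hcond with h' | hle
          · simp at h'
          · by_cases hc0 : c' = []
            · exact Or.inl hc0
            · right; simp only [List.length_cons] at hle; push_cast at hle ⊢; omega
        · simp only [List.map_cons, List.sum_cons, List.length_cons]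
          push_cast
          refine Prod.ext (by ring) (Prod.ext (by ring) (by ring))

-- the signed full-range sum collapses to 2*Σ_S f − Σ_l f for a sublist S of a Nodup list l
theorem signed_sum_eq {l S : List Int} (f : Int → Int)
    (hS : S.Sublist l) (hnd : l.Nodup) :
    (l.map (fun x => if x ∈ S then f x else -f x)).sum
      = 2 * (S.map f).sum - (l.map f).sum := by
  induction hS with
  | slnil => simp
  | @cons S l a h ih =>
    have hal : a ∉ l := (List.nodup_cons.mp hnd).1
    have haS : a ∉ S := fun hmem => hal (h.mem hmem)
    rw [List.map_cons, List.sum_cons, if_neg haS, ih (List.nodup_cons.mp hnd).2,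
        List.map_cons, List.sum_cons]
    ring
  | @cons₂ S l a h ih =>
    have hal : a ∉ l := (List.nodup_cons.mp hnd).1
    have hrw : l.map (fun x => if x ∈ a :: S then f x else -f x)
        = l.map (fun x => if x ∈ S then f x else -f x) := by
      apply List.map_congr_left
      intro x hx
      have : x ≠ a := fun e => hal (e ▸ hx)
      simp [List.mem_cons, this]
    rw [List.map_cons, List.sum_cons, if_pos (List.mem_cons_self ..), hrw,
        ih (List.nodup_cons.mp hnd).2]
    simp only [List.map_cons, List.sum_cons]
    ring

-- pyGetD commutes with projecting a coordinate (instances of PySem.List.pyGetD_map)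
theorem pyGetD_proj_fst (points : List (Int × Int)) (i : Int) :
    PySem.List.pyGetD (points.map (·.1)) i 0 = (PySem.List.pyGetD points i (0, 0)).1 :=
  PySem.List.pyGetD_map (·.1) points i (0, 0)

theorem pyGetD_proj_snd (points : List (Int × Int)) (i : Int) :
    PySem.List.pyGetD (points.map (·.2)) i 0 = (PySem.List.pyGetD points i (0, 0)).2 :=
  PySem.List.pyGetD_map (·.2) points i (0, 0)

-- A's signed full-range sums, written with B's point lookups
theorem pvA_signed_fst (points : List (Int × Int)) (n : Int) (c : List Int)
    (hsub : c.Sublist (PySem.List.pyRange 0 n 1)) :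
    ((PySem.List.pyRange 0 n 1).map (fun x =>
        if x ∈ c then PySem.List.pyGetD (points.map (·.1)) x 0
        else -(PySem.List.pyGetD (points.map (·.1)) x 0))).sum
      = 2 * (c.map (fun i => (PySem.List.pyGetD points i (0, 0)).1)).sum
        - ((PySem.List.pyRange 0 n 1).map (fun i => (PySem.List.pyGetD points i (0, 0)).1)).sum := by
  simp only [pyGetD_proj_fst]
  exact signed_sum_eq (fun i => (PySem.List.pyGetD points i (0, 0)).1) hsub
    (PySem.List.nodup_pyRange_one 0 n)

theorem pvA_signed_snd (points : List (Int × Int)) (n : Int) (c : List Int)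
    (hsub : c.Sublist (PySem.List.pyRange 0 n 1)) :
    ((PySem.List.pyRange 0 n 1).map (fun x =>
        if x ∈ c then PySem.List.pyGetD (points.map (·.2)) x 0
        else -(PySem.List.pyGetD (points.map (·.2)) x 0))).sum
      = 2 * (c.map (fun i => (PySem.List.pyGetD points i (0, 0)).2)).sum
        - ((PySem.List.pyRange 0 n 1).map (fun i => (PySem.List.pyGetD points i (0, 0)).2)).sum := by
  simp only [pyGetD_proj_snd]
  exact signed_sum_eq (fun i => (PySem.List.pyGetD points i (0, 0)).2) hsub
    (PySem.List.nodup_pyRange_one 0 n)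

-- ===== VERDICT (by name: the statement is the Claim_ definition above) =====
theorem solution_spec : Claim_equal_solution := by
  intro n points _ hpre
  rcases hpre with ⟨hn0, _⟩
  unfold Spec_solution
  have hhalf0 : 0 ≤ PySem.Int.floordiv n 2 := by
    rw [PySem.Int.floordiv_eq_ediv_of_pos (by norm_num)]
    exact Int.ediv_nonneg hn0 (by norm_num)
  have h1 : solution n points =
      ((pvCombos (PySem.List.pyRange 0 n 1) ((PySem.Int.floordiv n 2).toNat)).map
        (fun comb =>
          ((PySem.List.pyRange 0 n 1).map
            (fun x => if x ∈ comb then PySem.List.pyGetD (points.map (·.1)) x 0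
                      else -(PySem.List.pyGetD (points.map (·.1)) x 0))).sum ^ 2 +
          ((PySem.List.pyRange 0 n 1).map
            (fun x => if x ∈ comb then PySem.List.pyGetD (points.map (·.2)) x 0
                      else -(PySem.List.pyGetD (points.map (·.2)) x 0))).sum ^ 2)).min?.getD 0 :=
    congrArg (fun o : Option Int => o.getD 0)
      (pvfold_min _ (pvCombos (PySem.List.pyRange 0 n 1) ((PySem.Int.floordiv n 2).toNat)))
  rw [h1]
  simp only [solution_alt]
  rw [pvFold_split (PySem.Int.floordiv n 2) points (PySem.List.pyRange 0 n 1) 0 0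
      (PySem.Set.ofList [(0, 0, 0)])]
  simp only [zero_add]
  rw [pvpymin_id]
  congr 1
  apply pvmin_congr
  intro v
  rw [List.mem_map, List.mem_filterMap]
  constructor
  · rintro ⟨c, hcmem, rfl⟩
    rcases (pvCombos_mem_iff _ _ c).mp hcmem with ⟨hsub, hlen⟩
    have hlc : (c.length : Int) = PySem.Int.floordiv n 2 := by omega
    refine ⟨((c.length : Int),
        (c.map (fun i => (PySem.List.pyGetD points i (0, 0)).1)).sum,
        (c.map (fun i => (PySem.List.pyGetD points i (0, 0)).2)).sum), ?_, ?_⟩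
    · rw [pvMem_reach]
      refine ⟨(0, 0, 0), by simp [PySem.Set.mem_ofList], c, hsub, Or.inr (by omega), by simp⟩
    · simp only [hlc, beq_self_eq_true, if_true]
      rw [pvA_signed_fst points n c hsub, pvA_signed_snd points n c hsub]
  · rintro ⟨u, hu, he⟩
    rw [pvMem_reach] at hu
    rcases hu with ⟨u0, hu0, c, hsub, _, rfl⟩
    have hu0' : u0 = (0, 0, 0) := by simpa [PySem.Set.mem_ofList] using hu0
    subst hu0'
    simp only [zero_add] at he
    split_ifs at he with hc
    rw [beq_iff_eq] at hc
    have hlen : c.length = (PySem.Int.floordiv n 2).toNat := by omega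
    rcases Option.some_inj.mp he with rfl
    refine ⟨c, (pvCombos_mem_iff _ _ c).mpr ⟨hsub, hlen⟩, ?_⟩
    rw [pvA_signed_fst points n c hsub, pvA_signed_snd points n c hsub]
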